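-- pv_equiv track=rewrite | github.com/decajoin/algorithms-homework-2024 | FinalAssignment/code/BacktrackingAlgorithm.py | find_minimal_covers
-- ===== SOURCE A (Python) =====
-- def is_cover(hypergraph, vertex_cover):
--     return all(bool(edge & vertex_cover) for edge in hypergraph)
--
-- def find_minimal_covers(hypergraph):
--     all_vertices = sorted(list(set.union(*hypergraph)), key=int)
--     minimal_covers = []
--
--     def backtrack(index, current_cover):
--         if index == len(all_vertices):
--             if is_cover(hypergraph, current_cover):
--                 if all(not is_cover(hypergraph, current_cover - {v}) for v in current_cover):
--                     minimal_covers.append(set(current_cover))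
--             return
--
--         vertex = all_vertices[index]
--
--         # 不包含当前顶点
--         backtrack(index + 1, current_cover)
--
--         # 包含当前顶点
--         current_cover.add(vertex)
--         backtrack(index + 1, current_cover)
--         current_cover.remove(vertex)
--
--     backtrack(0, set())
--     return minimal_covers
-- ===== SOURCE B (Python) =====
-- def find_minimal_covers(hypergraph):
--     vertices = sorted(set().union(*hypergraph), key=int)
--     n = len(vertices)
--     minimal_covers = []
--     for mask in range(2 ** n):
--         cover = {v for i, v in enumerate(vertices) if (mask // 2 ** (n - 1 - i)) % 2 == 1}
--         if any(cover.isdisjoint(edge) for edge in hypergraph):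
--             continue
--         if all(any(v in edge and all(x == v or x not in cover for x in edge)
--                    for edge in hypergraph) for v in cover):
--             minimal_covers.append(cover)
--     return minimal_covers
-- ===== Notes on version B (the rewrite author's own statement) =====
-- stated objective: alternative
-- what changed: B replaces A's recursive include/exclude backtracking (with an in-place mutated set and a remove-one-vertex re-cover minimality test) by a single flat loop over the 2^n bit masks, decoding each candidate set arithmetically from its mask and testing minimality locally via a private-edge witness (an edge whose only covered vertex is v) instead of re-running the cover test on each one-vertex-removed set.
-- crash fix: On the empty hypergraph A raises TypeError (set.union() with no arguments) while B returns a one-element list holding the empty cover, the unique minimal cover of a hypergraph with no edges. — e.g. on find_minimal_covers([]): A raises TypeError, B returns [[]]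
import Mathlib
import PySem

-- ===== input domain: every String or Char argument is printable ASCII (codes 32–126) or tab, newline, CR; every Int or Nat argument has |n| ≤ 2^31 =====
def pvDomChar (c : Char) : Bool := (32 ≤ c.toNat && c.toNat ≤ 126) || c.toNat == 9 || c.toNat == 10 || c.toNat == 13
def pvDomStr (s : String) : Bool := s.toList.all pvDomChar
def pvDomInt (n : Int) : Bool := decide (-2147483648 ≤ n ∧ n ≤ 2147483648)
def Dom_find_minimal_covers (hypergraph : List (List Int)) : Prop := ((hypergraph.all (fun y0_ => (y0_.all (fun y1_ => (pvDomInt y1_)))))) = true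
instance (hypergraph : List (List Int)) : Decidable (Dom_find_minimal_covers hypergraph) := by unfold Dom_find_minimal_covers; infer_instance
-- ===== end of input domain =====

-- B replaces A's recursive backtracking over vertices by a single flat loop over the 2^n bit
-- masks (decoding each candidate from the mask) with a private-edge minimality test; same
-- values in the same order, no speed claim. A mutates its local set in place; the ports pass
-- the same values functionally.

-- ===== PORT A =====
-- bool(edge & vertex_cover) for each edge, all(...)
def pvCoverA (hypergraph : List (List Int)) (c : PySem.Set Int) : Bool :=
  hypergraph.all (fun edge => !(PySem.Set.inter (PySem.Set.ofList edge) c).isEmpty)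

-- all(not is_cover(hypergraph, current_cover - {v}) for v in current_cover)
def pvMinimalA (hypergraph : List (List Int)) (c : PySem.Set Int) : Bool :=
  c.all (fun v => !pvCoverA hypergraph (PySem.Set.diff c [v]))

-- backtrack(index, current_cover): recursion on the suffix all_vertices[index:]
def pvBacktrackA (hypergraph : List (List Int)) (vs : List Int) (c : PySem.Set Int) :
    List (List Int) :=
  match vs with
  | [] =>
      if pvCoverA hypergraph c then
        if pvMinimalA hypergraph c then [c] else []
      else []
  | v :: rest =>
      pvBacktrackA hypergraph rest c ++ pvBacktrackA hypergraph rest (PySem.Set.add c v)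

def find_minimal_covers (hypergraph : List (List Int)) : List (List Int) :=
  match hypergraph with
  | [] => []  -- Python raises TypeError here (set.union with no arguments); excluded by Pre_
  | e0 :: rest =>
      let all_vertices :=
        PySem.List.sorted
          (rest.foldl (fun s e => PySem.Set.union s (PySem.Set.ofList e)) (PySem.Set.ofList e0))
          (fun x => x) false
      pvBacktrackA hypergraph all_vertices PySem.Set.empty

-- ===== PORT B =====
-- {v for i, v in enumerate(vertices) if (mask // 2 ** (n - 1 - i)) % 2 == 1}
-- (.toNat is exact: enumerate yields 0 ≤ i < n, so the Python exponent n - 1 - i is ≥ 0)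
def pvMaskCover (vertices : List Int) (mask : Int) : PySem.Set Int :=
  PySem.Set.ofList
    (((PySem.List.enumerate vertices).filter (fun p =>
        PySem.Int.mod
          (PySem.Int.floordiv mask (2 ^ (((vertices.length : Int)) - 1 - p.1).toNat)) 2 == 1)).map
      (fun p => p.2))

-- any(v in edge and all(x == v or x not in cover for x in edge) for edge in hypergraph)
def pvHasPrivateEdge (hypergraph : List (List Int)) (cover : PySem.Set Int) (v : Int) : Bool :=
  hypergraph.any (fun edge =>
    edge.contains v && edge.all (fun x => x == v || !(PySem.Set.contains cover x)))

def find_minimal_covers_alt (hypergraph : List (List Int)) : List (List Int) :=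
  let vertices :=
    PySem.List.sorted
      (hypergraph.foldl (fun s e => PySem.Set.union s (PySem.Set.ofList e)) PySem.Set.empty)
      (fun x => x) false
  (PySem.List.pyRange 0 (2 ^ vertices.length) 1).foldl
    (fun acc mask =>
      let cover := pvMaskCover vertices mask
      if hypergraph.any (fun edge => PySem.Set.isdisjoint cover edge) then acc
      else if cover.all (fun v => pvHasPrivateEdge hypergraph cover v) then acc ++ [cover]
      else acc)
    []

-- ===== PRECONDITION & SPEC =====
-- Pre_ excludes only the empty hypergraph, on which `set.union(*hypergraph)` raises TypeError in A.
def Pre_find_minimal_covers (hypergraph : List (List Int)) : Prop := hypergraph ≠ []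
instance (hypergraph : List (List Int)) : Decidable (Pre_find_minimal_covers hypergraph) := by unfold Pre_find_minimal_covers; infer_instance
def pvWitness_find_minimal_covers : List (List Int) := [[1, 2], [2, 3]]

-- On the empty hypergraph A raises TypeError (set.union() with no arguments); B returns a
-- one-element list holding the empty cover, the unique minimal cover when there are no edges.
def Raises_find_minimal_covers (hypergraph : List (List Int)) : Prop := hypergraph = []
instance (hypergraph : List (List Int)) : Decidable (Raises_find_minimal_covers hypergraph) := by unfold Raises_find_minimal_covers; infer_instance
def pvRaiseWitness_find_minimal_covers : List (List Int) := []
def pvRaiseWitnessOut_find_minimal_covers : List (List Int) := [[]]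

def Spec_find_minimal_covers (hypergraph : List (List Int)) (out : List (List Int)) : Prop := out = find_minimal_covers_alt hypergraph
instance (hypergraph : List (List Int)) (out : List (List Int)) : Decidable (Spec_find_minimal_covers hypergraph out) := by unfold Spec_find_minimal_covers; infer_instance

-- ===== CLAIM (what is proved, stated in full; the proofs are below) =====
def Claim_equal_find_minimal_covers : Prop := ∀ (hypergraph : List (List Int)), Dom_find_minimal_covers hypergraph → Pre_find_minimal_covers hypergraph → Spec_find_minimal_covers hypergraph (find_minimal_covers hypergraph)
def Claim_raises_find_minimal_covers : Prop := (∀ (hypergraph : List (List Int)), Dom_find_minimal_covers hypergraph → Raises_find_minimal_covers hypergraph → ¬ Pre_find_minimal_covers hypergraph) ∧ (Dom_find_minimal_covers (pvRaiseWitness_find_minimal_covers) ∧ Raises_find_minimal_covers (pvRaiseWitness_find_minimal_covers) ∧ find_minimal_covers_alt (pvRaiseWitness_find_minimal_covers) = pvRaiseWitnessOut_find_minimal_covers)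

-- ===== LEMMAS AND PROOFS =====

-- the value A's recursion contributes at a leaf
def pvLeaf (hypergraph : List (List Int)) (c : PySem.Set Int) : List (List Int) :=
  if pvCoverA hypergraph c then if pvMinimalA hypergraph c then [c] else [] else []

-- the sub-list of vs selected by mask m, most significant bit first (A's branch order)
def pvSel : List Int → Nat → List Int
  | [], _ => []
  | v :: rest, m => (if 2 ^ rest.length ≤ m then [v] else []) ++ pvSel rest (m % 2 ^ rest.length)

theorem pvSel_sublist (vs : List Int) (m : Nat) : (pvSel vs m).Sublist vs := by
  induction vs generalizing m with
  | nil => simp [pvSel]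
  | cons v rest ih =>
      unfold pvSel
      split
      · exact (ih _).cons₂ v
      · exact (ih _).cons v

-- A's recursion enumerates the masks 0 .. 2^|vs|-1 in order, MSB = first vertex
theorem pvBacktrackA_eq_flatMap (h : List (List Int)) :
    ∀ (vs : List Int) (c : PySem.Set Int), vs.Nodup → (∀ v ∈ vs, v ∉ c) →
      pvBacktrackA h vs c
        = (List.range (2 ^ vs.length)).flatMap (fun m => pvLeaf h (c ++ pvSel vs m)) := by
  intro vs
  induction vs with
  | nil =>
      intro c _ _
      simp [pvBacktrackA, pvLeaf, pvSel]
  | cons v rest ih =>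
      intro c hnd hfresh
      have hv : v ∉ c := hfresh v (List.mem_cons_self ..)
      have hnd' : rest.Nodup := (List.nodup_cons.1 hnd).2
      have hlen : (v :: rest).length = rest.length + 1 := rfl
      have hsplit : (2 : Nat) ^ (rest.length + 1) = 2 ^ rest.length + 2 ^ rest.length := by
        rw [pow_succ]; omega
      have hadd : PySem.Set.add c v = c ++ [v] := by
        simp [PySem.Set.add, PySem.Set.contains, hv]
      have h1 := ih c hnd' (fun u hu => hfresh u (List.mem_cons_of_mem _ hu))
      have h2 := ih (c ++ [v]) hnd' (fun u hu => by
        intro hmem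
        rcases List.mem_append.1 hmem with h' | h'
        · exact hfresh u (List.mem_cons_of_mem _ hu) h'
        · exact (List.nodup_cons.1 hnd).1 ((List.mem_singleton.1 h') ▸ hu))
      show pvBacktrackA h rest c ++ pvBacktrackA h rest (PySem.Set.add c v) = _
      rw [hadd, h1, h2, hlen, hsplit, List.range_add, List.flatMap_append, List.flatMap_map]
      congr 1
      · refine List.flatMap_congr (fun m hm => ?_)
        have hm' : m < 2 ^ rest.length := List.mem_range.1 hm
        have hsel : pvSel (v :: rest) m = pvSel rest m := by
          simp only [pvSel]
          rw [if_neg (by omega), Nat.mod_eq_of_lt hm']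
          simp
        rw [hsel]
      · refine List.flatMap_congr (fun m hm => ?_)
        have hm' : m < 2 ^ rest.length := List.mem_range.1 hm
        have hsel : pvSel (v :: rest) (2 ^ rest.length + m) = v :: pvSel rest m := by
          simp only [pvSel]
          rw [if_pos (by omega), Nat.add_mod_left, Nat.mod_eq_of_lt hm']
          simp
        simp only [hsel]
        rw [List.append_assoc]
        rfl

-- bit test of B's comprehension = pvSel, generalized over the enumerate offset
theorem pvSel_eq_enum (n M : Nat) :
    ∀ (vs : List Int) (s : Nat), s + vs.length = n →
      (((PySem.List.enumerate vs (s : Int)).filter (fun p =>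
          PySem.Int.mod
            (PySem.Int.floordiv (M : Int) (2 ^ (((n : Int)) - 1 - p.1).toNat)) 2 == 1)).map
        (fun p => p.2))
      = pvSel vs (M % 2 ^ vs.length) := by
  intro vs
  induction vs with
  | nil => intro s hs; simp [PySem.List.enumerate_nil, pvSel]
  | cons v rest ih =>
      intro s hs
      have hk : s + (rest.length + 1) = n := by simpa using hs
      have hexp : (((n : Int)) - 1 - (s : Int)).toNat = rest.length := by omega
      have hcast : ((2 : Int) ^ rest.length) = ((2 ^ rest.length : Nat) : Int) := by
        push_cast; ring
      have hfd : PySem.Int.floordiv (M : Int) ((2 ^ rest.length : Nat) : Int)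
          = ((M / 2 ^ rest.length : Nat) : Int) := PySem.Int.floordiv_natCast _ _
      have hmod : PySem.Int.mod ((M / 2 ^ rest.length : Nat) : Int) 2
          = ((M / 2 ^ rest.length % 2 : Nat) : Int) := by
        have h2 := PySem.Int.mod_natCast (M / 2 ^ rest.length) 2
        simp only [Nat.cast_ofNat] at h2
        exact h2
      have htest : (PySem.Int.mod
            (PySem.Int.floordiv (M : Int) (2 ^ (((n : Int)) - 1 - ((s : Int), v).1).toNat)) 2 == 1)
          = decide (M / 2 ^ rest.length % 2 = 1) := by
        simp only [hexp, hcast, hfd, hmod]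
        rcases Nat.mod_two_eq_zero_or_one (M / 2 ^ rest.length) with hb | hb <;> (rw [hb]; decide)
      have hmm : M % 2 ^ (rest.length + 1) % 2 ^ rest.length = M % 2 ^ rest.length :=
        Nat.mod_mod_of_dvd _ (pow_dvd_pow 2 (Nat.le_succ _))
      have hpos : 0 < 2 ^ rest.length := by positivity
      have hbit : (2 ^ rest.length ≤ M % 2 ^ (rest.length + 1)) ↔ M / 2 ^ rest.length % 2 = 1 := by
        have hms : M % 2 ^ (rest.length + 1)
            = M % 2 ^ rest.length + 2 ^ rest.length * (M / 2 ^ rest.length % 2) :=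
          Nat.mod_pow_succ
        have hlt : M % 2 ^ rest.length < 2 ^ rest.length := Nat.mod_lt _ hpos
        rcases Nat.mod_two_eq_zero_or_one (M / 2 ^ rest.length) with hb | hb
        · rw [hms, hb]; simp; omega
        · rw [hms, hb]; simp
      have hrec := ih (s + 1) (by omega)
      rw [PySem.List.enumerate_cons]
      simp only [List.filter_cons, List.length_cons, pvSel, htest]
      rw [hmm]
      by_cases hb : M / 2 ^ rest.length % 2 = 1
      · rw [if_pos (hbit.2 hb)]
        simp only [hb, decide_true]
        rw [← hrec]
        push_cast
        simp
      · rw [if_neg (fun hx => hb (hbit.1 hx))]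
        simp only [hb, decide_false]
        rw [← hrec]
        push_cast
        simp

theorem pvMaskCover_eq (vs : List Int) (hnd : vs.Nodup) (m : Nat) (hm : m < 2 ^ vs.length) :
    pvMaskCover vs ((0 : Int) + (m : Int)) = pvSel vs m := by
  unfold pvMaskCover
  have h0 : ((0 : Int) + (m : Int)) = ((m : Nat) : Int) := by omega
  rw [h0]
  have hsel := pvSel_eq_enum vs.length m vs 0 (by omega)
  simp only [Nat.cast_zero] at hsel
  rw [hsel, Nat.mod_eq_of_lt hm]
  exact PySem.Set.ofList_eq_self_of_nodup _ ((pvSel_sublist vs m).nodup hnd)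

-- B's pruning test is the negation of A's cover test
theorem pvDisjoint_eq (h : List (List Int)) (c : PySem.Set Int) :
    h.any (fun edge => PySem.Set.isdisjoint c edge) = !pvCoverA h c := by
  rw [Bool.eq_iff_iff]
  simp only [pvCoverA, PySem.Set.isdisjoint, PySem.Set.inter, PySem.Set.contains,
    List.any_eq_true, Bool.not_eq_true', List.isEmpty_iff, List.filter_eq_nil_iff,
    List.contains_iff_mem, Bool.not_eq_false, List.any_eq_false, List.all_eq_false,
    PySem.Set.mem_ofList]
  constructor
  all_goals rintro ⟨e, he, hp⟩
  all_goals refine ⟨e, he, fun x hx hx2 => ?_⟩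
  all_goals exact hp x hx2 hx

-- on a set that covers, A's remove-one-vertex test agrees with B's private-edge test
theorem pvMinimal_eq_private (h : List (List Int)) (c : PySem.Set Int)
    (hc : pvCoverA h c = true) :
    pvMinimalA h c = c.all (fun v => pvHasPrivateEdge h c v) := by
  have hc' : ∀ e ∈ h, ∃ x ∈ e, x ∈ c := by
    intro e he
    have h1 := (List.all_eq_true.1 hc) e he
    simp only [PySem.Set.inter, PySem.Set.contains, Bool.not_eq_eq_eq_not, Bool.not_true,
      List.isEmpty_eq_false_iff] at h1
    obtain ⟨x, hx⟩ := List.exists_mem_of_ne_nil _ h1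
    rw [List.mem_filter] at hx
    exact ⟨x, (PySem.Set.mem_ofList _ _).1 hx.1, List.contains_iff_mem.1 hx.2⟩
  unfold pvMinimalA
  refine List.all_congr rfl (fun v => ?_)
  rw [Bool.eq_iff_iff]
  simp only [pvHasPrivateEdge, pvCoverA, PySem.Set.diff, PySem.Set.inter, PySem.Set.contains,
    Bool.not_eq_true', List.all_eq_false, List.any_eq_true, List.isEmpty_iff,
    List.filter_eq_nil_iff, List.mem_filter, List.contains_iff_mem, PySem.Set.mem_ofList,
    List.all_eq_true, Bool.and_eq_true, Bool.or_eq_true, beq_iff_eq, Bool.not_eq_false]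
  have hb1 : ∀ a : Int, (([v].contains a) = false) ↔ a ≠ v := by intro a; simp
  have hb2 : ∀ a : Int, ((List.contains c a) = false) ↔ a ∉ c := by intro a; simp
  simp only [hb1, hb2]
  constructor
  · rintro ⟨e, he, hall⟩
    obtain ⟨x, hx, hxc⟩ := hc' e he
    have hxv : x = v := by
      by_contra hne
      exact hall x hx ⟨hxc, hne⟩
    refine ⟨e, he, hxv ▸ hx, fun y hy => ?_⟩
    by_cases hyv : y = v
    · exact Or.inl hyv
    · exact Or.inr (fun hyc => hall y hy ⟨hyc, hyv⟩)
  · rintro ⟨e, he, hv, hall⟩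
    refine ⟨e, he, fun a ha hcon => ?_⟩
    rcases hall a ha with h' | h'
    · exact hcon.2 h'
    · exact h' hcon.1

-- the vertex set is duplicate-free
theorem nodup_foldl_union (rest : List (List Int)) (s : PySem.Set Int) (hs : s.Nodup) :
    (rest.foldl (fun s e => PySem.Set.union s (PySem.Set.ofList e)) s).Nodup := by
  induction rest generalizing s with
  | nil => simpa
  | cons e es ih => exact ih _ (PySem.Set.nodup_union _ _ hs)

theorem allv_nodup (e0 : List Int) (rest : List (List Int)) :
    (PySem.List.sorted
      (rest.foldl (fun s e => PySem.Set.union s (PySem.Set.ofList e)) (PySem.Set.ofList e0))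
      (fun x => x) false).Nodup :=
  (PySem.List.sorted_perm _ _ _).nodup_iff.2
    (nodup_foldl_union rest _ (PySem.Set.nodup_ofList e0))

-- B's whole loop, rewritten as the same flatMap over List.range
theorem alt_eq_flatMap (h : List (List Int)) (vs : List Int) (hnd : vs.Nodup) :
    ((PySem.List.pyRange 0 (2 ^ vs.length) 1).foldl
      (fun acc mask =>
        let cover := pvMaskCover vs mask
        if h.any (fun edge => PySem.Set.isdisjoint cover edge) then acc
        else if cover.all (fun v => pvHasPrivateEdge h cover v) then acc ++ [cover]
        else acc)
      [])
    = (List.range (2 ^ vs.length)).flatMap (fun m => pvLeaf h (pvSel vs m)) := by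
  rw [PySem.List.pyRange_one,
    show (((2 : Int) ^ vs.length - 0).toNat) = 2 ^ vs.length by
      rw [show ((2 : Int) ^ vs.length - 0) = ((2 ^ vs.length : Nat) : Int) by push_cast; ring,
        Int.toNat_natCast],
    List.foldl_map]
  rw [PySem.List.foldl_congr_mem _ _
      (fun (acc : List (List Int)) (k : Nat) => acc ++ pvLeaf h (pvSel vs k)) _
      (fun acc k hk => ?_)]
  · exact PySem.List.foldl_append_eq_flatMap _ _ _
  · have hk' : k < 2 ^ vs.length := List.mem_range.1 hk
    simp only
    rw [pvMaskCover_eq vs hnd k hk', pvDisjoint_eq]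
    by_cases hcov : pvCoverA h (pvSel vs k) = true
    · rw [hcov, ← pvMinimal_eq_private h _ hcov]
      simp only [Bool.not_true, Bool.false_eq_true, if_false, pvLeaf, hcov, if_true]
      split <;> simp
    · have hcov' : pvCoverA h (pvSel vs k) = false := by
        simpa using hcov
      rw [hcov']
      simp [pvLeaf, hcov']

-- ===== VERDICT (by name: the statement is the Claim_ definition above) =====
theorem find_minimal_covers_spec : Claim_equal_find_minimal_covers := by
  intro hg _ hpre
  unfold Spec_find_minimal_covers
  match hg, hpre with
  | e0 :: rest, _ =>
    unfold find_minimal_covers find_minimal_covers_alt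
    simp only
    have hfold : (e0 :: rest).foldl
          (fun s e => PySem.Set.union s (PySem.Set.ofList e)) PySem.Set.empty
        = rest.foldl (fun s e => PySem.Set.union s (PySem.Set.ofList e))
            (PySem.Set.ofList e0) := by
      show rest.foldl _ (PySem.Set.union PySem.Set.empty (PySem.Set.ofList e0)) = _
      congr 1
      show PySem.Set.ofList (PySem.Set.ofList e0) = PySem.Set.ofList e0
      exact PySem.Set.ofList_eq_self_of_nodup _ (PySem.Set.nodup_ofList e0)
    rw [hfold]
    have hnd := allv_nodup e0 rest
    rw [alt_eq_flatMap (e0 :: rest) _ hnd]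
    rw [pvBacktrackA_eq_flatMap (e0 :: rest) _ PySem.Set.empty hnd
      (fun v _ hmem => by simp [PySem.Set.empty] at hmem)]
    refine List.flatMap_congr (fun m _ => ?_)
    rfl

@[simp]
theorem find_minimal_covers_raises : Claim_raises_find_minimal_covers := by
  unfold Claim_raises_find_minimal_covers
  exact ⟨fun hg _ hr hp => hp hr, by decide⟩
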